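-- pv_equiv track=rewrite | github.com/GeorgeWebDevCy/woocommerce-csv-to-skrouz-xml | src/skroutz_feed_builder/core.py | split_escaped_list
-- ===== SOURCE A (Python) =====
-- from typing import Any
--
-- def clean_text(value: Any) -> str:
--     return str(value or "").strip()
--
-- def split_escaped_list(value: str) -> list[str]:
--     items: list[str] = []
--     current: list[str] = []
--     escaped = False
--     for char in clean_text(value):
--         if escaped:
--             current.append(char)
--             escaped = False
--             continue
--         if char == "\\":
--             escaped = True
--             continue
--         if char == ",":
--             item = "".join(current).strip()
--             if item:
--                 items.append(item)
--             current = []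
--             continue
--         current.append(char)
--     tail = "".join(current).strip()
--     if tail:
--         items.append(tail)
--     return items
-- ===== SOURCE B (Python) =====
-- from typing import Any
--
-- def clean_text(value: Any) -> str:
--     return str(value or "").strip()
--
-- def split_escaped_list(value: str) -> list[str]:
--     text = clean_text(value)
--     # Phase 1: cut on backslashes and re-join, resolving each escape;
--     # escaped commas become a \x00 placeholder so phase 2 can split on ','.
--     segs = text.split("\\")
--     parts = [segs[0]]
--     i = 1
--     while i < len(segs):
--         seg = segs[i]
--         if seg:
--             parts.append("\x00" if seg[0] == "," else seg[0])
--             parts.append(seg[1:])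
--             i += 1
--         elif i + 1 < len(segs):
--             # empty segment: the escaped char is the next backslash itself,
--             # and the following segment is fully literal
--             parts.append("\\")
--             parts.append(segs[i + 1])
--             i += 2
--         else:
--             # dangling trailing backslash is dropped
--             i += 1
--     protected = "".join(parts)
--     # Phase 2: split on (unescaped) commas, strip, keep non-empty, restore commas.
--     out = []
--     for field in protected.split(","):
--         f = field.strip()
--         if f:
--             out.append(f.replace("\x00", ","))
--     return out
-- ===== Notes on version B (the rewrite author's own statement) =====
-- stated objective: faster
-- what changed: B replaces A's per-character escape-flag state machine by a two-phase pipeline: it cuts the text on backslashes with str.split and re-joins the pieces resolving each escape (escaped commas become a \x00 placeholder), then splits the protected string on commas, strips, filters empties and restores the placeholders.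
import Mathlib
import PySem

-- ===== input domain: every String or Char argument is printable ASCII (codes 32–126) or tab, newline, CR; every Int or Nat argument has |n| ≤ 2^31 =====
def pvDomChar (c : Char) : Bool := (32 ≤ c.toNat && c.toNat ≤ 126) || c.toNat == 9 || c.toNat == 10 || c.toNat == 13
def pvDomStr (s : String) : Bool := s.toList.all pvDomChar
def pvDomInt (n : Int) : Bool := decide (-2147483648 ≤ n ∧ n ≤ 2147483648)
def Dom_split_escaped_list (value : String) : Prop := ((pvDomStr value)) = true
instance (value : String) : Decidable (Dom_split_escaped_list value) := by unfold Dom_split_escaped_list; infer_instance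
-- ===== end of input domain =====

set_option maxRecDepth 4000

-- B replaces A's per-character escape-flag state machine by a two-phase split/rejoin
-- pipeline (cut on backslashes, resolve escapes into a placeholder, split on commas);
-- objective: faster (same O(n) asymptotics; a timing run measured B ≥ 1.5× faster, constant-factor: bulk str.split work instead of a per-character loop).

-- ===== PORT A =====
-- clean_text(value) for a str argument is value.strip(); ports work on .toList
-- via the exact PySem.Chars primitives (PySem.Str.toList_strip bridge).

-- the body of A's for-loop, on the state (items, current, escaped)
def pvStepA (st : List (List Char) × List Char × Bool) (c : Char) :
    List (List Char) × List Char × Bool :=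
  match st with
  | (items, cur, escaped) =>
    if escaped then (items, cur ++ [c], false)
    else if c = '\\' then (items, cur, true)
    else if c = ',' then
      (if PySem.Chars.strip cur ≠ [] then items ++ [PySem.Chars.strip cur] else items, [], false)
    else (items, cur ++ [c], false)

-- A's code after the loop: flush the stripped tail if non-empty
def pvFinishA (st : List (List Char) × List Char × Bool) : List String :=
  (if PySem.Chars.strip st.2.1 ≠ [] then st.1 ++ [PySem.Chars.strip st.2.1] else st.1).map String.mk

def split_escaped_list (value : String) : List String :=
  pvFinishA ((PySem.Chars.strip value.toList).foldl pvStepA ([], [], false))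

-- ===== PORT B =====
def pvNul : Char := Char.ofNat 0

-- Source B's while-loop over segs[1:]: each segment's first char is the escaped one;
-- an empty segment means the escaped char is the next backslash itself
def pvGoB : List (List Char) → List (List Char)
  | [] => []
  | (c :: t) :: rest => (if c = ',' then [pvNul] else [c]) :: t :: pvGoB rest
  | [] :: r1 :: rest => ['\\'] :: r1 :: pvGoB rest
  | [[]] => []

def split_escaped_list_alt (value : String) : List String :=
  let text := PySem.Chars.strip value.toList          -- clean_text(value)
  let segs := PySem.Chars.splitOn text ['\\']         -- text.split("\\")
  let parts : List (List Char) :=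
    match segs with
    | [] => []                                        -- unreachable: split is never empty
    | s0 :: rest => s0 :: pvGoB rest
  let prot := PySem.Chars.join [] parts               -- "".join(parts)
  (PySem.Chars.splitOn prot [',']).foldl              -- for field in prot.split(","): …
    (fun out field =>
      if PySem.Chars.strip field ≠ [] then
        out ++ [String.mk (PySem.Chars.replace (PySem.Chars.strip field) [pvNul] [','])]
      else out) []

-- ===== PRECONDITION & SPEC =====
def Spec_split_escaped_list (value : String) (out : List String) : Prop := out = split_escaped_list_alt value
instance (value : String) (out : List String) : Decidable (Spec_split_escaped_list value out) := by unfold Spec_split_escaped_list; infer_instance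

-- ===== CLAIM (what is proved, stated in full; the proofs are below) =====
def Claim_equal_split_escaped_list : Prop := ∀ (value : String), Dom_split_escaped_list value → Spec_split_escaped_list value (split_escaped_list value)

-- ===== LEMMAS AND PROOFS =====
def pvEsc (c : Char) : Char := if c = ',' then pvNul else c

-- escape resolution of the whole text (what both pipelines compute):
-- a backslash consumes the next char (escaped commas protected), a dangling one is dropped
def pvDecode : List Char → List Char
  | [] => []
  | [c] => if c = '\\' then [] else [c]
  | c :: d :: cs => if c = '\\' then pvEsc d :: pvDecode cs else c :: pvDecode (d :: cs)

-- decode with the loop's escaped-flag already set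
def pvDecodeE (e : Bool) (cs : List Char) : List Char :=
  if e then (match cs with | [] => [] | d :: cs' => pvEsc d :: pvDecode cs') else pvDecode cs

def pvSplitC (d : Char) : List Char → List (List Char)
  | [] => [[]]
  | c :: cs => if c = d then [] :: pvSplitC d cs else (pvSplitC d cs).modifyHead (c :: ·)

theorem pvSplitC_ne_nil (d : Char) (l : List Char) : pvSplitC d l ≠ [] := by
  induction l with
  | nil => simp [pvSplitC]
  | cons c cs ih =>
    simp only [pvSplitC]
    split
    · simp
    · cases hh : pvSplitC d cs with
      | nil => exact absurd hh ih
      | cons a b => simp [hh]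

theorem pvSplitC_cons (d : Char) (l : List Char) : ∃ h t, pvSplitC d l = h :: t := by
  cases hh : pvSplitC d l with
  | nil => exact absurd hh (pvSplitC_ne_nil d l)
  | cons a b => exact ⟨a, b, rfl⟩

theorem go_spec (d : Char) : ∀ (fuel : Nat) (l cur : List Char) (acc : List (List Char)), l.length < fuel →
    PySem.Chars.splitOn.go [d] fuel l cur acc
      = acc.reverse ++ (pvSplitC d l).modifyHead (cur.reverse ++ ·) := by
  intro fuel
  induction fuel with
  | zero => intro l cur acc h; omega
  | succ n ih =>
    intro l cur acc h
    match l with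
    | [] => rw [PySem.Chars.splitOn.go.eq_def]; simp [pvSplitC]
    | c :: rest =>
      rw [PySem.Chars.splitOn.go.eq_def]
      simp only [List.isPrefixOf]
      by_cases hc : c = d
      · subst hc
        simp only [beq_self_eq_true, Bool.true_and, List.isPrefixOf_nil_left, if_true,
          List.length_cons, List.length_nil, List.drop_succ_cons, List.drop_zero]
        rw [ih rest [] ((cur.reverse) :: acc) (by simpa using h)]
        obtain ⟨h0, t0, he⟩ := pvSplitC_cons c rest
        simp only [pvSplitC, he, if_true, List.modifyHead_cons, List.reverse_nil,
          List.nil_append, eq_self_iff_true]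
        simp
      · have hbe : (d == c) = false := by
          simp only [beq_eq_false_iff_ne]; exact fun h => hc h.symm
        simp only [hbe, Bool.false_and, if_neg Bool.false_ne_true]
        rw [ih rest (c :: cur) acc (by simpa using h)]
        obtain ⟨h0, t0, he⟩ := pvSplitC_cons d rest
        simp only [pvSplitC, if_neg hc, he, List.modifyHead_cons, List.reverse_cons,
          List.append_assoc, List.singleton_append]

theorem splitOn_eq (d : Char) (l : List Char) :
    PySem.Chars.splitOn l [d] = pvSplitC d l := by
  rw [PySem.Chars.splitOn, go_spec d (l.length + 1) l [] [] (by omega)]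
  obtain ⟨h0, t0, he⟩ := pvSplitC_cons d l
  simp [he]

theorem replace_go_spec (a b : Char) : ∀ (fuel : Nat) (l acc : List Char), l.length ≤ fuel →
    PySem.Chars.replace.go [a] [b] fuel l acc
      = acc.reverse ++ l.map (fun c => if c = a then b else c) := by
  intro fuel
  induction fuel with
  | zero =>
    intro l acc h
    have : l = [] := List.eq_nil_of_length_eq_zero (by omega)
    subst this
    rw [PySem.Chars.replace.go.eq_def]; simp
  | succ n ih =>
    intro l acc h
    match l with
    | [] => rw [PySem.Chars.replace.go.eq_def]; simp
    | c :: rest =>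
      rw [PySem.Chars.replace.go.eq_def]
      simp only [List.isPrefixOf]
      by_cases hc : c = a
      · subst hc
        simp only [beq_self_eq_true, Bool.true_and, List.isPrefixOf_nil_left, if_true,
          List.length_cons, List.length_nil, List.drop_succ_cons, List.drop_zero]
        rw [show ([b].reverse ++ acc : List Char) = b :: acc by simp,
          ih rest (b :: acc) (by simp at h; omega)]
        simp only [List.map_cons, if_true, List.reverse_cons, List.append_assoc,
          List.singleton_append, eq_self_iff_true]
      · have hbe : (a == c) = false := by
          simp only [beq_eq_false_iff_ne]; exact fun h => hc h.symm
        simp only [hbe, Bool.false_and, if_neg Bool.false_ne_true]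
        rw [ih rest (c :: acc) (by simp at h; omega)]
        simp [if_neg hc]

theorem replace_single (a b : Char) (l : List Char) :
    PySem.Chars.replace l [a] [b] = l.map (fun c => if c = a then b else c) := by
  rw [PySem.Chars.replace]
  simp only [List.isEmpty_cons, if_neg Bool.false_ne_true]
  rw [replace_go_spec a b l.length l [] (by omega)]
  simp


-- phase 2 of B, in flatMap form
def pvPost (l : List Char) : List String :=
  (pvSplitC ',' l).flatMap (fun field =>
    if PySem.Chars.strip field ≠ [] then
      [String.mk (PySem.Chars.replace (PySem.Chars.strip field) [pvNul] [','])]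
    else [])

theorem splitC_no_d (d : Char) (l : List Char) : ∀ s ∈ pvSplitC d l, d ∉ s := by
  induction l with
  | nil => intro s hs; simp [pvSplitC] at hs; simp [hs]
  | cons c cs ih =>
    intro s hs
    simp only [pvSplitC] at hs
    obtain ⟨h0, t0, he⟩ := pvSplitC_cons d cs
    by_cases hc : c = d
    · rw [if_pos hc] at hs
      rcases List.mem_cons.mp hs with h1 | h1
      · simp [h1]
      · exact ih s h1
    · rw [if_neg hc, he, List.modifyHead_cons] at hs
      rcases List.mem_cons.mp hs with h1 | h1
      · subst h1
        intro hm
        rcases List.mem_cons.mp hm with h2 | h2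
        · exact hc h2.symm
        · exact ih h0 (by simp [he]) h2
      · exact ih s (by simp [he, h1])

theorem splitC_rejoin (d : Char) (l : List Char) :
    ∀ s0 rest, pvSplitC d l = s0 :: rest → l = s0 ++ rest.flatMap (fun s => d :: s) := by
  induction l with
  | nil =>
    intro s0 rest h
    simp only [pvSplitC] at h
    obtain ⟨h1, h2⟩ := List.cons.inj h
    rw [← h1, ← h2]
    simp
  | cons c cs ih =>
    intro s0 rest h
    simp only [pvSplitC] at h
    obtain ⟨h0, t0, he⟩ := pvSplitC_cons d cs
    by_cases hc : c = d
    · rw [if_pos hc] at h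
      obtain ⟨h1, h2⟩ := List.cons.inj h
      subst hc
      rw [← h1, ← h2, he, List.flatMap_cons, ih h0 t0 he]
      simp
    · rw [if_neg hc, he, List.modifyHead_cons] at h
      obtain ⟨h1, h2⟩ := List.cons.inj h
      rw [← h1, ← h2, ih h0 t0 he]
      simp

theorem splitC_free (d : Char) (l : List Char) (h : d ∉ l) : pvSplitC d l = [l] := by
  induction l with
  | nil => simp [pvSplitC]
  | cons c cs ih =>
    have hc : ¬ c = d := fun hh => h (by simp [hh])
    have : pvSplitC d cs = [cs] := ih (fun hh => h (List.mem_cons_of_mem _ hh))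
    simp [pvSplitC, if_neg hc, this]

theorem splitC_append (d : Char) (p q : List Char) (h : d ∉ p) :
    pvSplitC d (p ++ d :: q) = p :: pvSplitC d q := by
  induction p with
  | nil => simp [pvSplitC]
  | cons c cs ih =>
    have hc : ¬ c = d := fun hh => h (by simp [hh])
    have := ih (fun hh => h (List.mem_cons_of_mem _ hh))
    simp [pvSplitC, if_neg hc, this]

-- pvDecode lemmas
theorem pvDecode_cons_ne (c : Char) (t : List Char) (hc : ¬ c = '\\') :
    pvDecode (c :: t) = c :: pvDecode t := by
  cases t <;> simp [pvDecode, hc]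

theorem pvDecode_free (s t : List Char) (h : ('\\' : Char) ∉ s) :
    pvDecode (s ++ t) = s ++ pvDecode t := by
  induction s with
  | nil => simp
  | cons c cs ih =>
    have hc : ¬ c = '\\' := fun hh => h (by simp [hh])
    rw [List.cons_append, pvDecode_cons_ne _ _ hc, ih (fun hh => h (List.mem_cons_of_mem _ hh))]
    simp

theorem pvDecode_esc (d : Char) (u : List Char) :
    pvDecode ('\\' :: d :: u) = pvEsc d :: pvDecode u := by
  simp [pvDecode]

-- join with the empty separator is flatten
theorem join_nil_flatten (l : List (List Char)) : PySem.Chars.join [] l = l.flatten := by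
  induction l with
  | nil => rw [PySem.Chars.join_nil]; rfl
  | cons a t ih =>
    cases t with
    | nil => rw [PySem.Chars.join_singleton]; simp
    | cons b t' =>
      rw [PySem.Chars.join_cons_cons, ih]
      simp

-- phase 1 of B computes pvDecode of the re-joined text
theorem goB_spec (rest : List (List Char)) (h : ∀ s ∈ rest, ('\\' : Char) ∉ s) :
    (pvGoB rest).flatten = pvDecode (rest.flatMap (fun s => '\\' :: s)) := by
  induction rest using pvGoB.induct with
  | case1 => simp [pvGoB, pvDecode]
  | case2 c t rest ih =>
    have hfree : ('\\' : Char) ∉ c :: t := h _ List.mem_cons_self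
    have hc : ¬ c = '\\' := fun hh => hfree (by simp [hh])
    rw [List.flatMap_cons]
    simp only [pvGoB, List.flatten_cons]
    rw [ih (fun s hs => h s (List.mem_cons_of_mem _ hs))]
    rw [show ('\\' :: (c :: t) ++ List.flatMap (fun s => '\\' :: s) rest : List Char)
        = '\\' :: c :: (t ++ List.flatMap (fun s => '\\' :: s) rest) by simp]
    rw [pvDecode_esc]
    rw [pvDecode_free t _ (fun hh => hfree (List.mem_cons_of_mem _ hh))]
    have : (if c = ',' then [pvNul] else [c]) = [pvEsc c] := by
      unfold pvEsc; split <;> rfl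
    simp [this]
  | case3 r1 rest ih =>
    have hfree : ('\\' : Char) ∉ r1 := h _ (List.mem_cons_of_mem _ List.mem_cons_self)
    simp only [pvGoB, List.flatten_cons, List.flatMap_cons]
    rw [ih (fun s hs => h s (List.mem_cons_of_mem _ (List.mem_cons_of_mem _ hs)))]
    rw [show ('\\' :: [] ++ ('\\' :: r1 ++ List.flatMap (fun s => '\\' :: s) rest) : List Char)
        = '\\' :: '\\' :: (r1 ++ List.flatMap (fun s => '\\' :: s) rest) by simp]
    rw [pvDecode_esc]
    rw [pvDecode_free r1 _ hfree]
    have : pvEsc '\\' = '\\' := by decide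
    simp [this]
  | case4 => simp [pvGoB, pvDecode]

-- B's final foldl in flatMap form
theorem foldl_post (l : List (List Char)) (init : List String) :
    l.foldl (fun out field =>
      if PySem.Chars.strip field ≠ [] then
        out ++ [String.mk (PySem.Chars.replace (PySem.Chars.strip field) [pvNul] [','])]
      else out) init
    = init ++ l.flatMap (fun field =>
      if PySem.Chars.strip field ≠ [] then
        [String.mk (PySem.Chars.replace (PySem.Chars.strip field) [pvNul] [','])]
      else []) := by
  induction l generalizing init with
  | nil => simp
  | cons a t ih =>
    simp only [List.foldl_cons, List.flatMap_cons]
    rw [ih]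
    split <;> simp

-- B = pvPost ∘ pvDecode ∘ strip
theorem B_eq (value : String) :
    split_escaped_list_alt value = pvPost (pvDecode (PySem.Chars.strip value.toList)) := by
  obtain ⟨s0, rest, he⟩ := pvSplitC_cons '\\' (PySem.Chars.strip value.toList)
  have hfree := splitC_no_d '\\' (PySem.Chars.strip value.toList)
  rw [he] at hfree
  have hs0 : ('\\' : Char) ∉ s0 := hfree s0 List.mem_cons_self
  have hrest : ∀ s ∈ rest, ('\\' : Char) ∉ s := fun s hs => hfree s (List.mem_cons_of_mem _ hs)
  dsimp only [split_escaped_list_alt]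
  rw [show PySem.Chars.splitOn (PySem.Chars.strip value.toList) ['\\'] = s0 :: rest from
    (splitOn_eq _ _).trans he]
  dsimp only []
  rw [join_nil_flatten, List.flatten_cons, goB_spec rest hrest,
    ← pvDecode_free s0 _ hs0,
    ← splitC_rejoin '\\' (PySem.Chars.strip value.toList) s0 rest he,
    splitOn_eq, foldl_post]
  simp [pvPost]

-- esc preserves whitespace-ness and never yields a comma
theorem isspace_esc (c : Char) : PySem.Chars.isspace (pvEsc c) = PySem.Chars.isspace c := by
  unfold pvEsc
  split
  · rename_i h; rw [h]; decide
  · rfl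

theorem esc_ne_comma (c : Char) : pvEsc c ≠ ',' := by
  unfold pvEsc
  split
  · decide
  · assumption

theorem strip_map_esc (l : List Char) :
    PySem.Chars.strip (l.map pvEsc) = (PySem.Chars.strip l).map pvEsc := by
  simp only [PySem.Chars.strip, PySem.Chars.lstrip, PySem.Chars.rstrip]
  rw [List.dropWhile_map]
  have h1 : (PySem.Chars.isspace ∘ pvEsc) = PySem.Chars.isspace := by
    funext c; simp [Function.comp, isspace_esc]
  rw [h1, ← List.map_reverse, List.dropWhile_map, h1, ← List.map_reverse]

theorem mem_strip (l : List Char) (c : Char) (h : c ∈ PySem.Chars.strip l) : c ∈ l := by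
  simp only [PySem.Chars.strip, PySem.Chars.lstrip, PySem.Chars.rstrip] at h
  rw [List.mem_reverse] at h
  have h2 := (List.dropWhile_sublist _).mem h
  rw [List.mem_reverse] at h2
  exact (List.dropWhile_sublist _).mem h2

theorem replace_unesc (f : List Char) (h : pvNul ∉ f) :
    PySem.Chars.replace (f.map pvEsc) [pvNul] [','] = f := by
  rw [replace_single, List.map_map]
  rw [List.map_congr_left (g := id) ?h]
  · simp
  intro c hc
  simp only [Function.comp, id]
  by_cases hcc : c = ','
  · subst hcc; simp [pvEsc]
  · have : pvEsc c = c := by simp [pvEsc, hcc]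
    rw [this]
    have : ¬ c = pvNul := fun hh => h (hh ▸ hc)
    simp [this]

-- the one-chunk form of pvPost, for a NUL-free raw chunk
theorem post_chunk (cur : List Char) (h : pvNul ∉ cur) :
    (if PySem.Chars.strip (cur.map pvEsc) ≠ [] then
        [String.mk (PySem.Chars.replace (PySem.Chars.strip (cur.map pvEsc)) [pvNul] [','])]
      else [])
    = if PySem.Chars.strip cur ≠ [] then [String.mk (PySem.Chars.strip cur)] else [] := by
  simp only [strip_map_esc]
  have hnil : ((PySem.Chars.strip cur).map pvEsc = [] ) ↔ (PySem.Chars.strip cur = []) := by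
    simp
  have hn : pvNul ∉ PySem.Chars.strip cur := fun hm => h (mem_strip _ _ hm)
  by_cases hz : PySem.Chars.strip cur = []
  · simp [hz]
  · rw [if_pos (by simpa [hnil] using hz), if_pos hz, replace_unesc _ hn]

theorem post_free (cur : List Char) (h : pvNul ∉ cur) :
    pvPost (cur.map pvEsc)
      = if PySem.Chars.strip cur ≠ [] then [String.mk (PySem.Chars.strip cur)] else [] := by
  unfold pvPost
  have hfree : (',' : Char) ∉ cur.map pvEsc := by
    intro hm
    obtain ⟨c, _, hc⟩ := List.mem_map.mp hm
    exact esc_ne_comma c hc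
  rw [splitC_free ',' _ hfree, List.flatMap_cons, List.flatMap_nil, List.append_nil]
  exact post_chunk cur h

theorem post_split (cur q : List Char) (h : pvNul ∉ cur) :
    pvPost (cur.map pvEsc ++ ',' :: q)
      = (if PySem.Chars.strip cur ≠ [] then [String.mk (PySem.Chars.strip cur)] else []) ++ pvPost q := by
  unfold pvPost
  have hfree : (',' : Char) ∉ cur.map pvEsc := by
    intro hm
    obtain ⟨c, _, hc⟩ := List.mem_map.mp hm
    exact esc_ne_comma c hc
  rw [splitC_append ',' _ q hfree, List.flatMap_cons]
  rw [post_chunk cur h]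

-- the loop invariant of A
theorem A_inv (cs : List Char) : ∀ (items : List (List Char)) (cur : List Char) (escaped : Bool),
    pvNul ∉ cs → pvNul ∉ cur →
    pvFinishA (cs.foldl pvStepA (items, cur, escaped))
      = items.map String.mk ++ pvPost (cur.map pvEsc ++ pvDecodeE escaped cs) := by
  induction cs with
  | nil =>
    intro items cur escaped _ hcur
    have hE : pvDecodeE escaped [] = [] := by
      unfold pvDecodeE; split <;> simp [pvDecode]
    simp only [List.foldl_nil, pvFinishA, hE, List.append_nil]
    rw [post_free cur hcur]
    split <;> simp
  | cons c cs ih =>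
    intro items cur escaped hcs hcur
    have hc : ¬ c = pvNul := fun hh => hcs (by simp [hh])
    have hcs' : pvNul ∉ cs := fun hh => hcs (List.mem_cons_of_mem _ hh)
    have hcur' : pvNul ∉ cur ++ [c] := by
      intro hm
      rcases List.mem_append.mp hm with hm | hm
      · exact hcur hm
      · have hpc : pvNul = c := by simpa using hm
        exact hc hpc.symm
    cases escaped with
    | true =>
      rw [List.foldl_cons,
        show pvStepA (items, cur, true) c = (items, cur ++ [c], false) by simp [pvStepA]]
      rw [ih items (cur ++ [c]) false hcs' hcur']
      simp [pvDecodeE]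
    | false =>
      by_cases hb : c = '\\'
      · subst hb
        rw [List.foldl_cons,
          show pvStepA (items, cur, false) '\\' = (items, cur, true) by simp [pvStepA]]
        rw [ih items cur true hcs' hcur]
        cases cs with
        | nil => simp [pvDecodeE, pvDecode]
        | cons d cs' => simp [pvDecodeE, pvDecode]
      · by_cases hcomma : c = ','
        · subst hcomma
          rw [List.foldl_cons,
            show pvStepA (items, cur, false) ','
              = (if PySem.Chars.strip cur ≠ [] then items ++ [PySem.Chars.strip cur] else items,
                 [], false) by simp [pvStepA]]
          rw [ih _ [] false hcs' (by simp)]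
          simp only [pvDecodeE, Bool.false_eq_true, if_false]
          rw [pvDecode_cons_ne ',' cs hb, post_split cur (pvDecode cs) hcur]
          split <;> simp
        · rw [List.foldl_cons,
            show pvStepA (items, cur, false) c = (items, cur ++ [c], false) by
              simp [pvStepA, if_neg hb, if_neg hcomma]]
          rw [ih items (cur ++ [c]) false hcs' hcur']
          simp only [pvDecodeE, Bool.false_eq_true, if_false]
          rw [pvDecode_cons_ne c cs hb]
          have he : pvEsc c = c := by simp [pvEsc, hcomma]
          simp [he]

theorem nul_not_mem (value : String) (h : Dom_split_escaped_list value) :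
    pvNul ∉ PySem.Chars.strip value.toList := by
  intro hm
  have hv : pvNul ∈ value.toList := mem_strip _ _ hm
  unfold Dom_split_escaped_list pvDomStr at h
  have := List.all_eq_true.mp h _ hv
  revert this
  decide

-- ===== VERDICT (by name: the statement is the Claim_ definition above) =====
theorem split_escaped_list_spec : Claim_equal_split_escaped_list := by
  intro value hdom
  unfold Spec_split_escaped_list
  rw [B_eq]
  unfold split_escaped_list
  rw [A_inv (PySem.Chars.strip value.toList) [] [] false (nul_not_mem value hdom) (by simp)]
  simp [pvDecodeE]
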